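-- pv_equiv track=rewrite | github.com/JohnDorsey/PyCellEliminationRun | SpiralMath.py | customizedSpiralCoord
-- ===== SOURCE A (Python) =====
-- def coordRotatedCW(coord):
--   return (coord[1],-coord[0])
--
-- def coordSum(coords):
--   result = (0,0)
--   for coord in coords:
--     result = (result[0] + coord[0], result[1] + coord[1])
--   return result
--
-- def customizedSpiralCoord(coord, home=None, rot=None, spin=None):
--   assert len(coord) == 2 and len(home) == 2
--   assert spin in [1,-1] #1 is CW, -1 is CCW.
--   result = (coord[0]*spin, coord[1])
--   for i in range(rot%4): #0 1 2 3 -> first step is N E S W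
--     result = coordRotatedCW(result)
--   result = coordSum([result, home])
--   return result
-- ===== SOURCE B (Python) =====
-- def customizedSpiralCoord(coord, home=None, rot=None, spin=None):
--   assert len(coord) == 2 and len(home) == 2
--   assert spin in [1,-1] #1 is CW, -1 is CCW.
--   x, y = coord[0]*spin, coord[1]
--   m = rot % 4
--   if m == 0:
--     rx, ry = x, y
--   elif m == 1:
--     rx, ry = y, -x
--   elif m == 2:
--     rx, ry = -x, -y
--   else:
--     rx, ry = -y, x
--   return (rx + home[0], ry + home[1])
-- ===== Notes on version B (the rewrite author's own statement) =====
-- stated objective: simpler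
-- what changed: Replaces the rotate-rot%4-times loop and the coordRotatedCW/coordSum helpers with a direct closed-form selection of the rotated pair by rot%4 and inline translation.
import Mathlib
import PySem

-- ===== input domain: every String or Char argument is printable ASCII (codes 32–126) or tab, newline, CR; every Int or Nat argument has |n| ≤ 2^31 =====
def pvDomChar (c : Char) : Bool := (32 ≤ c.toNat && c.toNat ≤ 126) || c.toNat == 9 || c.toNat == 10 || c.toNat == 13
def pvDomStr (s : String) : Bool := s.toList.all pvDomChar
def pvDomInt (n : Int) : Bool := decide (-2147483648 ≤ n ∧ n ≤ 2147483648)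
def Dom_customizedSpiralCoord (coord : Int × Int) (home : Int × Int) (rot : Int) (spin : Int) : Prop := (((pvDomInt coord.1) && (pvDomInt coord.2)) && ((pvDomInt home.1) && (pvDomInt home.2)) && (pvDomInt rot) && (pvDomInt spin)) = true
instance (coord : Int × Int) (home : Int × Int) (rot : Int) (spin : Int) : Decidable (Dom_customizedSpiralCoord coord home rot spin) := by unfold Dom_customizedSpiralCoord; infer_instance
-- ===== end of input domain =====

-- B replaces A's rotate-rot%4-times loop (and its coordRotatedCW/coordSum helpers) with a
-- closed-form case selection on rot%4; objective: simpler.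


-- ===== PORT A =====
def coordRotatedCW (c : Int × Int) : Int × Int := (c.2, -c.1)

def coordSum (coords : List (Int × Int)) : Int × Int :=
  coords.foldl (fun r c => (r.1 + c.1, r.2 + c.2)) (0, 0)

def customizedSpiralCoord (coord : Int × Int) (home : Int × Int) (rot : Int) (spin : Int) : Int × Int :=
  -- asserts: len checks always hold for pairs; 'spin in [1,-1]' is Pre_
  let result := (coord.1 * spin, coord.2)
  let result := (PySem.List.pyRange 0 (PySem.Int.mod rot 4) 1).foldl (fun r _ => coordRotatedCW r) result
  coordSum [result, home]

-- ===== PORT B =====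
def customizedSpiralCoord_alt (coord : Int × Int) (home : Int × Int) (rot : Int) (spin : Int) : Int × Int :=
  let x := coord.1 * spin
  let y := coord.2
  let m := PySem.Int.mod rot 4
  let r : Int × Int :=
    if m = 0 then (x, y)
    else if m = 1 then (y, -x)
    else if m = 2 then (-x, -y)
    else (-y, x)
  (r.1 + home.1, r.2 + home.2)

-- ===== PRECONDITION & SPEC =====
-- Pre_ excludes exactly the inputs where A's second assert raises (spin not 1 or -1).
def Pre_customizedSpiralCoord (coord : Int × Int) (home : Int × Int) (rot : Int) (spin : Int) : Prop :=
  spin = 1 ∨ spin = -1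
instance (coord : Int × Int) (home : Int × Int) (rot : Int) (spin : Int) : Decidable (Pre_customizedSpiralCoord coord home rot spin) := by unfold Pre_customizedSpiralCoord; infer_instance

def pvWitness_customizedSpiralCoord : (Int × Int) × (Int × Int) × Int × Int := ((1, 2), (3, 4), 5, 1)

def Spec_customizedSpiralCoord (coord : Int × Int) (home : Int × Int) (rot : Int) (spin : Int) (out : Int × Int) : Prop := out = customizedSpiralCoord_alt coord home rot spin
instance (coord : Int × Int) (home : Int × Int) (rot : Int) (spin : Int) (out : Int × Int) : Decidable (Spec_customizedSpiralCoord coord home rot spin out) := by unfold Spec_customizedSpiralCoord; infer_instance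

-- ===== CLAIM (what is proved, stated in full; the proofs are below) =====
def Claim_equal_customizedSpiralCoord : Prop := ∀ (coord : Int × Int) (home : Int × Int) (rot : Int) (spin : Int), Dom_customizedSpiralCoord coord home rot spin → Pre_customizedSpiralCoord coord home rot spin → Spec_customizedSpiralCoord coord home rot spin (customizedSpiralCoord coord home rot spin)

-- ===== LEMMAS AND PROOFS =====

-- ===== VERDICT (by name: the statement is the Claim_ definition above) =====
theorem customizedSpiralCoord_spec : Claim_equal_customizedSpiralCoord := by
  intro coord home rot spin _ _
  unfold Spec_customizedSpiralCoord customizedSpiralCoord customizedSpiralCoord_alt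
  have h0 : (0:Int) ≤ PySem.Int.mod rot 4 := PySem.Int.mod_nonneg rot (by norm_num)
  have h1 : PySem.Int.mod rot 4 < 4 := PySem.Int.mod_lt rot (by norm_num)
  have hc : PySem.Int.mod rot 4 = 0 ∨ PySem.Int.mod rot 4 = 1 ∨
      PySem.Int.mod rot 4 = 2 ∨ PySem.Int.mod rot 4 = 3 := by omega
  have e0 : PySem.List.pyRange 0 0 1 = ([] : List Int) := by decide
  have e1 : PySem.List.pyRange 0 1 1 = ([0] : List Int) := by decide
  have e2 : PySem.List.pyRange 0 2 1 = ([0, 1] : List Int) := by decide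
  have e3 : PySem.List.pyRange 0 3 1 = ([0, 1, 2] : List Int) := by decide
  rcases hc with h | h | h | h <;>
    simp only [h, e0, e1, e2, e3] <;>
    simp [coordRotatedCW, coordSum]
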